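-- pv_equiv track=rewrite | github.com/Enjef/Algo | 1600 - 1699/1680 - Concatenation of Consecutive Binary Numbers/1680 - Concatenation of Consecutive Binary Numbers.py | concatenatedBinary_2nd_best_memory
-- ===== SOURCE A (Python) =====
-- def concatenatedBinary_2nd_best_memory(n: int) -> int:
--     MOD = 10**9 + 7
--     length = 0
--     result = 0
--     for i in range(1, n + 1):
--         if i & (i - 1) == 0:
--             length += 1
--         result = ((result << length) | i) % MOD
--     return result
-- ===== SOURCE B (Python) =====
-- def concatenatedBinary_2nd_best_memory(n: int) -> int:
--     MOD = 10 ** 9 + 7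
--     acc = 0
--     pw = 1
--     for i in range(n, 0, -1):
--         acc = (acc + i * pw) % MOD
--         pw = (pw * (1 << i.bit_length())) % MOD
--     return acc
-- ===== Notes on version B (the rewrite author's own statement) =====
-- stated objective: alternative
-- what changed: A accumulates forward by shifting the running result left by a power-of-two-test-driven length counter and OR-ing in each number; B iterates backward over the same numbers summing each one times a multiplicatively maintained modular weight (the power of two given by the bits that follow it), reading widths directly from bit_length() with no shift/OR on the accumulator.
import Mathlib
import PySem

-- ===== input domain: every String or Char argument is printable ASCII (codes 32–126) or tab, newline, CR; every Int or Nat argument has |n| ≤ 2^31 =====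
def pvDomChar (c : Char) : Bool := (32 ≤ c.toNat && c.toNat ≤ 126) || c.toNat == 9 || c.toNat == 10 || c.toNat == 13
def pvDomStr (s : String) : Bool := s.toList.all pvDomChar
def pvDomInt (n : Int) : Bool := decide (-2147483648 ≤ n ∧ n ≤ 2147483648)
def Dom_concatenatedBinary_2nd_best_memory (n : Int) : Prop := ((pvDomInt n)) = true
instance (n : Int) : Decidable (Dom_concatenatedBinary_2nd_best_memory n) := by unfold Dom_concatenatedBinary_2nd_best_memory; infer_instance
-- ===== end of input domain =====

-- B replaces A's forward shift-and-or accumulation (with its power-of-two length counter)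
-- by a backward pass that sums each number times the modular weight of the bits after it,
-- maintaining the weight multiplicatively from bit_length; objective: alternative decomposition, same cost.

-- ===== PORT A =====
-- literal transliteration of A; the shift amount `length` is a nonnegative int throughout,
-- where Int <<< Int agrees with Python's <<.
def concatenatedBinary_2nd_best_memory (n : Int) : Int :=
  let MOD : Int := 10 ^ 9 + 7
  ((PySem.List.pyRange 1 (n + 1) 1).foldl
    (fun (st : Int × Int) i =>
      let length := if PySem.Int.band i (i - 1) == 0 then st.1 + 1 else st.1
      (length, PySem.Int.mod (PySem.Int.bor (st.2 <<< length) i) MOD))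
    (0, 0)).2

-- ===== PORT B =====
-- literal transliteration of Source B; i.bit_length() is PySem.Int.bitLength.
def concatenatedBinary_2nd_best_memory_alt (n : Int) : Int :=
  let MOD : Int := 10 ^ 9 + 7
  ((PySem.List.pyRange n 0 (-1)).foldl
    (fun (st : Int × Int) i =>
      (PySem.Int.mod (st.1 + i * st.2) MOD,
       PySem.Int.mod (st.2 * ((1 : Int) <<< (PySem.Int.bitLength i : Int))) MOD))
    (0, 1)).1

-- ===== PRECONDITION & SPEC =====
def Spec_concatenatedBinary_2nd_best_memory (n : Int) (out : Int) : Prop := out = concatenatedBinary_2nd_best_memory_alt n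
instance (n : Int) (out : Int) : Decidable (Spec_concatenatedBinary_2nd_best_memory n out) := by unfold Spec_concatenatedBinary_2nd_best_memory; infer_instance

-- ===== CLAIM (what is proved, stated in full; the proofs are below) =====
def Claim_equal_concatenatedBinary_2nd_best_memory : Prop := ∀ (n : Int), Dom_concatenatedBinary_2nd_best_memory n → Spec_concatenatedBinary_2nd_best_memory n (concatenatedBinary_2nd_best_memory n)

-- ===== LEMMAS AND PROOFS =====

-- the common value both loops converge to: A's forward recurrence, written with bit_length
def pvGA : Nat → Int
  | 0 => 0
  | k + 1 => (pvGA k * 2 ^ PySem.Int.bitLength ((k + 1 : Nat) : Int) + ((k : Int) + 1)) % (10 ^ 9 + 7)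

theorem pvGA_bounds (k : Nat) : 0 ≤ pvGA k ∧ pvGA k < 10 ^ 9 + 7 := by
  cases k with
  | zero => norm_num [pvGA]
  | succ k =>
    refine ⟨Int.emod_nonneg _ (by norm_num), Int.emod_lt_of_pos _ (by norm_num)⟩

-- (2a+1) & (2a) = 2a  (an even number and its successor share all bits above bit 0)
theorem pvLand1 (a : Nat) : (2 * a + 1) &&& (2 * a) = 2 * a := by
  apply Nat.eq_of_testBit_eq; intro i
  cases i with
  | zero => simp
  | succ j =>
    rw [Nat.testBit_land]
    simp only [Nat.testBit_succ]
    have h1 : (2 * a + 1) / 2 = a := by omega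
    have h2 : (2 * a) / 2 = a := by omega
    rw [h1, h2, Bool.and_self]

-- (2a+2) & (2a+1) = 2 * ((a+1) & a)
theorem pvLand2 (a : Nat) : (2 * a + 2) &&& (2 * a + 1) = 2 * ((a + 1) &&& a) := by
  apply Nat.eq_of_testBit_eq; intro i
  cases i with
  | zero => simp
  | succ j =>
    rw [Nat.testBit_land]
    simp only [Nat.testBit_succ]
    have h1 : (2 * a + 2) / 2 = a + 1 := by omega
    have h2 : (2 * a + 1) / 2 = a := by omega
    have h3 : (2 * ((a + 1) &&& a)) / 2 = (a + 1) &&& a := by omega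
    rw [h1, h2, h3, Nat.testBit_land]

-- A's power-of-two test drives its length counter exactly as bit_length grows
theorem pvBL_succ (m : Nat) :
    PySem.Int.bitLength ((m + 1 : Nat) : Int)
      = (if (m + 1) &&& m = 0 then PySem.Int.bitLength ((m : Nat) : Int) + 1
         else PySem.Int.bitLength ((m : Nat) : Int)) := by
  induction m using Nat.strong_induction_on with
  | _ m ih =>
    rcases Nat.even_or_odd m with ⟨a, ha⟩ | ⟨a, ha⟩
    · rcases Nat.eq_zero_or_pos a with rfl | hpos
      · subst ha; decide
      · have hm : m = 2 * a := by omega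
        subst hm
        have hc : (2 * a + 1) &&& (2 * a) = 2 * a := pvLand1 a
        have hne : ¬ ((2 * a + 1) &&& (2 * a) = 0) := by omega
        rw [if_neg hne]
        have e1 : PySem.Int.bitLength ((2 * a + 1 : Nat) : Int)
            = PySem.Int.bitLength ((a : Nat) : Int) + 1 := by
          have := PySem.Int.bitLength_natCast (m := 2 * a + 1) (by omega)
          have hd : (2 * a + 1) / 2 = a := by omega
          rwa [hd] at this
        have e2 : PySem.Int.bitLength ((2 * a : Nat) : Int)
            = PySem.Int.bitLength ((a : Nat) : Int) + 1 := by
          have := PySem.Int.bitLength_natCast (m := 2 * a) (by omega)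
          have hd : (2 * a) / 2 = a := by omega
          rwa [hd] at this
        rw [e1, e2]
    · have hm : m = 2 * a + 1 := by omega
      subst hm
      have hc : (2 * a + 1 + 1) &&& (2 * a + 1) = 2 * ((a + 1) &&& a) := by
        have := pvLand2 a; omega
      have e1 : PySem.Int.bitLength ((2 * a + 1 + 1 : Nat) : Int)
          = PySem.Int.bitLength ((a + 1 : Nat) : Int) + 1 := by
        have := PySem.Int.bitLength_natCast (m := 2 * a + 2) (by omega)
        have hd : (2 * a + 2) / 2 = a + 1 := by omega
        rw [hd] at this
        convert this using 3
      have e2 : PySem.Int.bitLength ((2 * a + 1 : Nat) : Int)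
          = PySem.Int.bitLength ((a : Nat) : Int) + 1 := by
        have := PySem.Int.bitLength_natCast (m := 2 * a + 1) (by omega)
        have hd : (2 * a + 1) / 2 = a := by omega
        rwa [hd] at this
      have iha := ih a (by omega)
      rw [e1, e2, hc, iha]
      by_cases h : (a + 1) &&& a = 0
      · rw [if_pos h, if_pos (by omega)]
      · rw [if_neg h, if_neg (by omega)]

-- aligned or is addition: (x * 2^t) ||| b = x * 2^t + b when b < 2^t
theorem pvMulPowOr : ∀ (t x b : Nat), b < 2 ^ t → (x * 2 ^ t) ||| b = x * 2 ^ t + b := by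
  intro t
  induction t with
  | zero => intro x b hb; interval_cases b; simp
  | succ t ih =>
    intro x b hb
    have hb2 : b >>> 1 < 2 ^ t := by
      have : b / 2 < 2 ^ t := by
        have h2 : 2 ^ (t + 1) = 2 * 2 ^ t := by ring
        omega
      simpa [Nat.shiftRight_one] using this
    have hx : x * 2 ^ (t + 1) = Nat.bit false (x * 2 ^ t) := by
      rw [Nat.bit_false_apply]; ring
    conv_lhs => rw [hx, ← Nat.bit_decide_mod_two_eq_one_shiftRight_one b]
    rw [Nat.lor_bit, ih x (b >>> 1) hb2]
    simp only [Nat.bit_val, Bool.false_or]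
    have hmod : (decide (b % 2 = 1)).toNat = b % 2 := by
      rcases Nat.mod_two_eq_zero_or_one b with h | h <;> simp [h]
    rw [hmod]
    have hsr : b >>> 1 = b / 2 := Nat.shiftRight_one b
    have hx2 : x * 2 ^ (t + 1) = 2 * (x * 2 ^ t) := by ring
    omega

-- A's shift-and-or step, in arithmetic form
theorem pvStepA (g : Int) (hg : 0 ≤ g) (k : Nat) :
    PySem.Int.bor (g <<< ((PySem.Int.bitLength ((k + 1 : Nat) : Int) : Nat) : Int)) ((k : Int) + 1)
      = g * 2 ^ PySem.Int.bitLength ((k + 1 : Nat) : Int) + ((k : Int) + 1) := by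
  obtain ⟨a, rfl⟩ := Int.eq_ofNat_of_zero_le hg
  set t := PySem.Int.bitLength ((k + 1 : Nat) : Int) with ht
  rw [Int.shiftLeft_eq_mul_pow]
  have hcast : (a : Int) * ((2 ^ t : Nat) : Int) = ((a * 2 ^ t : Nat) : Int) := by push_cast; ring
  have hk1 : ((k : Int) + 1) = ((k + 1 : Nat) : Int) := by push_cast; ring
  rw [hcast, hk1, PySem.Int.bor_natCast]
  have hlt : k + 1 < 2 ^ t := by
    have := PySem.Int.lt_two_pow_bitLength ((k + 1 : Nat) : Int)
    simpa [ht] using this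
  rw [pvMulPowOr t a (k + 1) hlt]
  push_cast; ring

-- A's loop over range(1, n+1) computes (bit_length n, pvGA n)
theorem pvFoldA (k : Nat) :
    (PySem.List.pyRange 1 ((k : Int) + 1) 1).foldl
      (fun (st : Int × Int) i =>
        let length := if PySem.Int.band i (i - 1) == 0 then st.1 + 1 else st.1
        (length, PySem.Int.mod (PySem.Int.bor (st.2 <<< length) i) (10 ^ 9 + 7)))
      (0, 0)
    = (((PySem.Int.bitLength ((k : Nat) : Int) : Nat) : Int), pvGA k) := by
  induction k with
  | zero =>
    rw [PySem.List.pyRange_one_eq_nil (by norm_num)]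
    simp [pvGA, PySem.Int.bitLength_zero]
  | succ k ih =>
    have hsplit : PySem.List.pyRange 1 (((k + 1 : Nat) : Int) + 1) 1
        = PySem.List.pyRange 1 ((k : Int) + 1) 1 ++ [(k : Int) + 1] := by
      have : (((k + 1 : Nat) : Int) + 1) = ((k : Int) + 1) + 1 := by push_cast; ring
      rw [this, PySem.List.pyRange_one_succ_right (by omega)]
    rw [hsplit, List.foldl_append, ih]
    have hband : PySem.Int.band ((k : Int) + 1) ((k : Int) + 1 - 1)
        = (((k + 1) &&& k : Nat) : Int) := by
      have h1 : ((k : Int) + 1) = ((k + 1 : Nat) : Int) := by push_cast; ring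
      have h2 : ((k : Int) + 1 - 1) = ((k : Nat) : Int) := by push_cast; ring
      rw [h2, h1, PySem.Int.band_natCast]
    have hlen : (if PySem.Int.band ((k : Int) + 1) ((k : Int) + 1 - 1) == 0
          then ((PySem.Int.bitLength ((k : Nat) : Int) : Nat) : Int) + 1
          else ((PySem.Int.bitLength ((k : Nat) : Int) : Nat) : Int))
        = ((PySem.Int.bitLength ((k + 1 : Nat) : Int) : Nat) : Int) := by
      rw [hband, pvBL_succ k]
      by_cases h : (k + 1) &&& k = 0
      · simp only [h, if_pos, Nat.cast_zero, beq_self_eq_true]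
        push_cast
        ring
      · have hne : ¬ ((((k + 1) &&& k : Nat) : Int) == 0) = true := by
          simp [h]
        rw [if_neg hne, if_neg h]
    simp only [List.foldl_cons, List.foldl_nil]
    rw [hlen]
    have hg := pvGA_bounds k
    rw [pvStepA (pvGA k) hg.1 k]
    rw [PySem.Int.mod_eq_emod_of_pos (by norm_num)]
    simp [pvGA]

-- one modular-arithmetic identity linking a backward step to a forward step
theorem pvModArith (P g w a c q : Int) :
    (g * ((w * q) % P) + (a + c * w) % P) % P = (((g * q + c) % P) * w + a) % P := by
  have h1 : (g * ((w * q) % P) + (a + c * w) % P) ≡ (g * (w * q) + (a + c * w)) [ZMOD P] :=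
    (Int.ModEq.mul_left g (Int.emod_emod_of_dvd _ dvd_rfl)).add (Int.emod_emod_of_dvd _ dvd_rfl)
  have h2 : (((g * q + c) % P) * w + a) ≡ ((g * q + c) * w + a) [ZMOD P] :=
    ((show ((g * q + c) % P) ≡ (g * q + c) [ZMOD P] from Int.emod_emod_of_dvd _ dvd_rfl).mul_right w).add_right a
  have h3 : g * (w * q) + (a + c * w) = (g * q + c) * w + a := by ring
  exact h1.trans (h3 ▸ h2.symm)

-- B's backward loop folds to pvGA k * pw + acc (mod p)
theorem pvFoldB (k : Nat) : ∀ acc pw : Int, 0 ≤ acc → acc < 10 ^ 9 + 7 →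
    ((PySem.List.pyRange ((k : Nat) : Int) 0 (-1)).foldl
      (fun (st : Int × Int) i =>
        (PySem.Int.mod (st.1 + i * st.2) (10 ^ 9 + 7),
         PySem.Int.mod (st.2 * ((1 : Int) <<< (PySem.Int.bitLength i : Int))) (10 ^ 9 + 7)))
      (acc, pw)).1
    = (pvGA k * pw + acc) % (10 ^ 9 + 7) := by
  induction k with
  | zero =>
    intro acc pw h0 h1
    rw [PySem.List.pyRange_neg_one_eq_nil (by norm_num)]
    show acc = (pvGA 0 * pw + acc) % (10 ^ 9 + 7)
    rw [show pvGA 0 * pw + acc = acc by simp [pvGA]]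
    exact (Int.emod_eq_of_lt h0 h1).symm
  | succ k ih =>
    intro acc pw h0 h1
    have hcons : PySem.List.pyRange (((k + 1 : Nat) : Int)) 0 (-1)
        = ((k : Int) + 1) :: PySem.List.pyRange ((k : Nat) : Int) 0 (-1) := by
      have hc : (((k + 1 : Nat) : Int)) = ((k : Int) + 1) := by push_cast; ring
      rw [hc, PySem.List.pyRange_neg_one_cons (by omega)]
      norm_num
    rw [hcons, List.foldl_cons]
    simp only
    rw [PySem.Int.mod_eq_emod_of_pos (by norm_num), PySem.Int.mod_eq_emod_of_pos (by norm_num)]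
    set L := PySem.Int.bitLength ((k : Int) + 1) with hL
    have hshl : (1 : Int) <<< ((L : Nat) : Int) = 2 ^ L := by
      rw [Int.one_shiftLeft]; push_cast; ring
    rw [hshl]
    rw [ih _ _ (Int.emod_nonneg _ (by norm_num)) (Int.emod_lt_of_pos _ (by norm_num))]
    have hGA : pvGA (k + 1) = (pvGA k * 2 ^ L + ((k : Int) + 1)) % (10 ^ 9 + 7) := by
      have : ((k + 1 : Nat) : Int) = ((k : Int) + 1) := by push_cast; ring
      rw [pvGA, this]
    rw [hGA]
    exact pvModArith (10 ^ 9 + 7) (pvGA k) pw acc ((k : Int) + 1) (2 ^ L)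

-- ===== VERDICT (by name: the statement is the Claim_ definition above) =====
theorem concatenatedBinary_2nd_best_memory_spec : Claim_equal_concatenatedBinary_2nd_best_memory := by
  intro n _
  unfold Spec_concatenatedBinary_2nd_best_memory
  unfold concatenatedBinary_2nd_best_memory concatenatedBinary_2nd_best_memory_alt
  dsimp only
  rcases (show n ≤ 0 ∨ 0 < n by omega) with hn | hn
  · rw [PySem.List.pyRange_one_eq_nil (by omega), PySem.List.pyRange_neg_one_eq_nil (by omega)]
    rfl
  · obtain ⟨k, rfl⟩ := Int.eq_ofNat_of_zero_le (le_of_lt hn)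
    rw [pvFoldA k, pvFoldB k 0 1 (by norm_num) (by norm_num)]
    have hb := pvGA_bounds k
    simp only [mul_one, add_zero]
    exact (Int.emod_eq_of_lt hb.1 hb.2).symm
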